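-- pv_equiv track=rewrite | github.com/ValenTiss/Trabajo_Practico | codigo.py | Aceptar_nombre_cajero
-- ===== SOURCE A (Python) =====
-- def Aceptar_nombre_cajero(posible_usuario,exp_regular,contador):
--   #Variable que contiene a la condición de parada
--   terminar = contador== len(posible_usuario)
--   #Si no se ha llegado a la condición de parada
--   if not terminar:
--     #Si se ha encontrado de 1 a 3 letras mayúsculas
--     if exp_regular == 0 or exp_regular == 1 or exp_regular == 2:
--       #Si es una letra mayúscula
--       if 65<=ord(posible_usuario[contador])<=90:
--         exp_regular+=1
--         contador+=1
--         return Aceptar_nombre_cajero(posible_usuario,exp_regular,contador)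
--       #No es una letra mayúscula
--       else:
--         return False
--     #Si ya se encontraron 3 letras mayúsculas y algún o ningún número
--     elif exp_regular >= 3:
--       #Si el carácter es un número
--       if 48<=ord(posible_usuario[contador])<=57:
--         exp_regular+=1
--         contador+=1
--         return Aceptar_nombre_cajero(posible_usuario,exp_regular,contador)
--       #Si el carácter no es un número
--       else:
--         return False
--     #Se encontró un caracter que hace que no se cumpla la expresión regular
--     else:
--       return False
--   #Si la hilera no está vacía y se verificó que cumple la expresión regular
--   elif len(posible_usuario) > 0 and exp_regular >= 4:
--     return True
--   #La hilera está vacía o no cumple la expresión regular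
--   else:
--     return False
-- ===== SOURCE B (Python) =====
-- def Aceptar_nombre_cajero(posible_usuario, exp_regular, contador):
--     n = len(posible_usuario)
--     while contador != n:
--         if exp_regular < 0:
--             return False
--         lo, hi = (65, 90) if exp_regular <= 2 else (48, 57)
--         if not (lo <= ord(posible_usuario[contador]) <= hi):
--             return False
--         exp_regular += 1
--         contador += 1
--     return n > 0 and exp_regular >= 4
-- ===== Notes on version B (the rewrite author's own statement) =====
-- stated objective: simpler
-- what changed: Replaces the tail recursion with a while loop and collapses the two symmetric uppercase/digit branches into one range check selected from exp_regular, keeping the exact same single pass.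
import Mathlib
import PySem

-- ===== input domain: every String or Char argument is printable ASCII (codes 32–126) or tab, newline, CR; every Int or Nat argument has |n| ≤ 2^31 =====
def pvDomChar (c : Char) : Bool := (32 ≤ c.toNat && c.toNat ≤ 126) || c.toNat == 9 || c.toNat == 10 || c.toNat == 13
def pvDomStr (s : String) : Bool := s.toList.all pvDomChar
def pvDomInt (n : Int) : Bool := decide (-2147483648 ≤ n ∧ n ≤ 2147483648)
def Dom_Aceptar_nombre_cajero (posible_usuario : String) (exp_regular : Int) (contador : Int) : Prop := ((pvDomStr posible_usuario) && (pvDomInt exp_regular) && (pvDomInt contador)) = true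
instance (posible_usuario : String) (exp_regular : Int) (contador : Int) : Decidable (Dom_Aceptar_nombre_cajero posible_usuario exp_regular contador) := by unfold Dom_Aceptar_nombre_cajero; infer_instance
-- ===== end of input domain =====

-- B rewrites A's tail recursion as a while loop with one range check chosen from exp_regular (simpler; return value only).

-- ===== PORT A =====
-- literal transliteration of A's recursion over the code-point list; `none` from pyGet?
-- marks Python's IndexError, which Pre_ excludes.
def pvAgo (cs : List Char) (exp_regular : Int) (contador : Int) : Bool :=
  let terminar := contador == (cs.length : Int)
  if !terminar then
    if exp_regular == 0 || exp_regular == 1 || exp_regular == 2 then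
      match h : PySem.List.pyGet? cs contador with
      | none => false  -- Python raises IndexError here (outside Pre_)
      | some ch =>
        if 65 ≤ (ch.toNat : Int) ∧ (ch.toNat : Int) ≤ 90 then
          pvAgo cs (exp_regular + 1) (contador + 1)
        else false
    else if exp_regular ≥ 3 then
      match h : PySem.List.pyGet? cs contador with
      | none => false  -- Python raises IndexError here (outside Pre_)
      | some ch =>
        if 48 ≤ (ch.toNat : Int) ∧ (ch.toNat : Int) ≤ 57 then
          pvAgo cs (exp_regular + 1) (contador + 1)
        else false
    else false
  else if (cs.length : Int) > 0 ∧ exp_regular ≥ 4 then true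
  else false
termination_by ((cs.length : Int) - contador).toNat
decreasing_by
  all_goals
    have hin : ¬ (PySem.List.pyGet? cs contador = none) := by simp [h]
    rw [PySem.List.pyGet?_eq_none_iff] at hin
    simp [PySem.Raise.InRange] at hin
    omega

def Aceptar_nombre_cajero (posible_usuario : String) (exp_regular : Int) (contador : Int) : Bool :=
  pvAgo posible_usuario.toList exp_regular contador

-- ===== PORT B =====
-- literal transliteration of Source B's while loop (structural recursion on the same counter).
def pvBgo (cs : List Char) (exp_regular : Int) (contador : Int) : Bool :=
  if contador == (cs.length : Int) then
    decide ((cs.length : Int) > 0 ∧ exp_regular ≥ 4)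
  else if exp_regular < 0 then false
  else
    let lohi : Int × Int := if exp_regular ≤ 2 then (65, 90) else (48, 57)
    match h : PySem.List.pyGet? cs contador with
    | none => false  -- Python raises IndexError here (outside Pre_)
    | some ch =>
      if lohi.1 ≤ (ch.toNat : Int) ∧ (ch.toNat : Int) ≤ lohi.2 then
        pvBgo cs (exp_regular + 1) (contador + 1)
      else false
termination_by ((cs.length : Int) - contador).toNat
decreasing_by
  all_goals
    have hin : ¬ (PySem.List.pyGet? cs contador = none) := by simp [h]
    rw [PySem.List.pyGet?_eq_none_iff] at hin
    simp [PySem.Raise.InRange] at hin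
    omega

def Aceptar_nombre_cajero_alt (posible_usuario : String) (exp_regular : Int) (contador : Int) : Bool :=
  pvBgo posible_usuario.toList exp_regular contador

-- ===== PRECONDITION & SPEC =====
-- Pre_ excludes exactly the inputs where Python A raises IndexError: exp_regular ≥ 0
-- with contador strictly outside [-len, len].
def Pre_Aceptar_nombre_cajero (posible_usuario : String) (exp_regular : Int) (contador : Int) : Prop :=
  exp_regular < 0 ∨ (-(posible_usuario.length : Int) ≤ contador ∧ contador ≤ (posible_usuario.length : Int))
instance (posible_usuario : String) (exp_regular : Int) (contador : Int) : Decidable (Pre_Aceptar_nombre_cajero posible_usuario exp_regular contador) := by unfold Pre_Aceptar_nombre_cajero; infer_instance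

def pvWitness_Aceptar_nombre_cajero : String × Int × Int := ("ABC12", 0, 0)

def Spec_Aceptar_nombre_cajero (posible_usuario : String) (exp_regular : Int) (contador : Int) (out : Bool) : Prop := out = Aceptar_nombre_cajero_alt posible_usuario exp_regular contador
instance (posible_usuario : String) (exp_regular : Int) (contador : Int) (out : Bool) : Decidable (Spec_Aceptar_nombre_cajero posible_usuario exp_regular contador out) := by unfold Spec_Aceptar_nombre_cajero; infer_instance

-- ===== CLAIM (what is proved, stated in full; the proofs are below) =====
def Claim_equal_Aceptar_nombre_cajero : Prop := ∀ (posible_usuario : String) (exp_regular : Int) (contador : Int), Dom_Aceptar_nombre_cajero posible_usuario exp_regular contador → Pre_Aceptar_nombre_cajero posible_usuario exp_regular contador → Spec_Aceptar_nombre_cajero posible_usuario exp_regular contador (Aceptar_nombre_cajero posible_usuario exp_regular contador)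

-- ===== LEMMAS AND PROOFS =====
theorem pyGet?_some_range (cs : List Char) (c : Int) (ch : Char)
    (hget : PySem.List.pyGet? cs c = some ch) :
    -(cs.length : Int) ≤ c ∧ c < (cs.length : Int) := by
  have hne : ¬ (PySem.List.pyGet? cs c = none) := by simp [hget]
  rw [PySem.List.pyGet?_eq_none_iff, not_not] at hne
  simp [PySem.Raise.InRange] at hne
  omega

theorem pvBgo_stop (cs : List Char) (e c : Int) (hc : c = (cs.length : Int)) :
    pvBgo cs e c = decide ((cs.length : Int) > 0 ∧ e ≥ 4) := by
  rw [pvBgo, if_pos (by simp [hc])]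

theorem pvBgo_none (cs : List Char) (e c : Int) (hc : ¬ c = (cs.length : Int))
    (hget : PySem.List.pyGet? cs c = none) : pvBgo cs e c = false := by
  rw [pvBgo, if_neg (by simp [hc])]
  split
  · rfl
  · split
    all_goals
      split
      · rfl
      · next ch' heq => rw [hget] at heq; cases heq

theorem pvBgo_neg (cs : List Char) (e c : Int) (hc : ¬ c = (cs.length : Int))
    (he : e < 0) : pvBgo cs e c = false := by
  rw [pvBgo, if_neg (by simp [hc]), if_pos he]

theorem pvBgo_some (cs : List Char) (e c : Int) (ch : Char)
    (hc : ¬ c = (cs.length : Int)) (he : ¬ e < 0)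
    (hget : PySem.List.pyGet? cs c = some ch) :
    pvBgo cs e c =
      if ((if e ≤ 2 then ((65:Int),(90:Int)) else ((48:Int),(57:Int))).1 ≤ (ch.toNat : Int)
          ∧ (ch.toNat : Int) ≤ (if e ≤ 2 then ((65:Int),(90:Int)) else ((48:Int),(57:Int))).2)
      then pvBgo cs (e+1) (c+1) else false := by
  rw [pvBgo, if_neg (by simp [hc]), if_neg he]
  split
  · next he2 =>
    split
    · next heq => rw [hget] at heq; cases heq
    · next ch' heq => rw [hget] at heq; injection heq with h'; subst h'; rfl
  · next he2 =>
    split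
    · next heq => rw [hget] at heq; cases heq
    · next ch' heq => rw [hget] at heq; injection heq with h'; subst h'; rfl

theorem pvAgo_eq_pvBgo (cs : List Char) (e c : Int)
    (h : e < 0 ∨ (-(cs.length : Int) ≤ c ∧ c ≤ (cs.length : Int))) :
    pvAgo cs e c = pvBgo cs e c := by
  fun_induction pvAgo cs e c
  case case1 e c ter hter he hget =>
    have hb : (!(c == (cs.length : Int))) = true := hter
    simp at hb he
    rw [pvBgo_none cs e c hb hget]
  case case2 e c ter hter he ch hget hch ih =>
    have hb : (!(c == (cs.length : Int))) = true := hter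
    simp at hb he
    have hr := pyGet?_some_range cs c ch hget
    rw [pvBgo_some cs e c ch hb (by omega) hget, if_pos (show e ≤ 2 by omega)]
    simp only [if_pos hch]
    exact ih (Or.inr ⟨by omega, by omega⟩)
  case case3 e c ter hter he ch hget hch =>
    have hb : (!(c == (cs.length : Int))) = true := hter
    simp at hb he
    rw [pvBgo_some cs e c ch hb (by omega) hget, if_pos (show e ≤ 2 by omega)]
    simp only [if_neg hch]
  case case4 e c ter hter he he3 hget =>
    have hb : (!(c == (cs.length : Int))) = true := hter
    simp at hb
    rw [pvBgo_none cs e c hb hget]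
  case case5 e c ter hter he he3 ch hget hch ih =>
    have hb : (!(c == (cs.length : Int))) = true := hter
    simp at hb
    have hr := pyGet?_some_range cs c ch hget
    rw [pvBgo_some cs e c ch hb (by omega) hget, if_neg (show ¬ e ≤ 2 by omega)]
    simp only [if_pos hch]
    exact ih (Or.inr ⟨by omega, by omega⟩)
  case case6 e c ter hter he he3 ch hget hch =>
    have hb : (!(c == (cs.length : Int))) = true := hter
    simp at hb
    rw [pvBgo_some cs e c ch hb (by omega) hget, if_neg (show ¬ e ≤ 2 by omega)]
    simp only [if_neg hch]
  case case7 e c ter hter he he3 =>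
    have hb : (!(c == (cs.length : Int))) = true := hter
    simp at hb he
    rw [pvBgo_neg cs e c hb (by omega)]
  case case8 e c ter hter hok =>
    have hb : ¬ ((!(c == (cs.length : Int))) = true) := hter
    simp at hb
    rw [pvBgo_stop cs e c hb]
    exact (decide_eq_true hok).symm
  case case9 e c ter hter hok =>
    have hb : ¬ ((!(c == (cs.length : Int))) = true) := hter
    simp at hb
    rw [pvBgo_stop cs e c hb]
    exact (decide_eq_false hok).symm

-- ===== VERDICT (by name: the statement is the Claim_ definition above) =====
theorem Aceptar_nombre_cajero_spec : Claim_equal_Aceptar_nombre_cajero := by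
  intro s e c _ hpre
  unfold Spec_Aceptar_nombre_cajero Aceptar_nombre_cajero Aceptar_nombre_cajero_alt
  exact pvAgo_eq_pvBgo _ _ _ (by simpa [Pre_Aceptar_nombre_cajero] using hpre)
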